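-- pv_equiv track=rewrite | github.com/enliktjioe/master-thesis-2021 | sandbox/faizalishah-appfeature_extraction-8e1f32259b4e/SAFE_Replication/SAFE_Evaluation.py | Type_Based_Exact_Matching
-- ===== SOURCE A (Python) =====
-- def Type_Based_Exact_Matching(true_features,extracted_features):
-- 	app_true_features =  true_features.copy()
-- 	app_predicted_features = extracted_features.copy()
--
-- 	tps = 0
-- 	fps = 0
-- 	fns = 0
--
-- 	for pindex,pred_feature in enumerate(app_predicted_features):
-- 		pred_feature_words = pred_feature.lower().split()
-- 		found=False
-- 		true_index = -1
-- 		for t_index,true_feature in enumerate(app_true_features):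
-- 			true_feature_words = true_feature.lower().split()
--
-- 			if len(pred_feature_words) == len(true_feature_words):
-- 				set_match = all([true_word in pred_feature_words for true_word in true_feature_words])
-- 			else:
-- 				set_match = False
--
-- 			if set_match==True:
-- 				found=True
-- 				true_index = t_index
-- 				break
--
-- 		if found == True:
-- 			tps = tps  + 1
-- 			del app_true_features[true_index]
--
-- 		else:
-- 			fps =  fps  +  1
--
-- 	fns = len(true_features) - tps
--
-- 	return tps,fps,fns
-- ===== SOURCE B (Python) =====
-- def Type_Based_Exact_Matching(true_features, extracted_features):
--     # Length-indexed buckets: word-count -> list of frozensets of words, in original order.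
--     buckets = {}
--     for t in true_features:
--         tw = t.lower().split()
--         buckets.setdefault(len(tw), []).append(frozenset(tw))
--     tps = 0
--     for p in extracted_features:
--         pw = p.lower().split()
--         ps = set(pw)
--         bucket = buckets.get(len(pw), [])
--         for i, ts in enumerate(bucket):
--             if ts <= ps:
--                 del bucket[i]
--                 tps += 1
--                 break
--     fps = len(extracted_features) - tps
--     fns = len(true_features) - tps
--     return tps, fps, fns
-- ===== Notes on version B (the rewrite author's own statement) =====
-- stated objective: faster
-- what changed: B precomputes lowered word lists once and indexes the true features in a dict keyed by word count (ordered buckets of frozensets), so each predicted phrase scans only its own length bucket with a set-subset test and fps/fns fall out by subtraction, instead of A's rescan of all remaining true features with lower/split recomputed in every inner iteration.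
import Mathlib
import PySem

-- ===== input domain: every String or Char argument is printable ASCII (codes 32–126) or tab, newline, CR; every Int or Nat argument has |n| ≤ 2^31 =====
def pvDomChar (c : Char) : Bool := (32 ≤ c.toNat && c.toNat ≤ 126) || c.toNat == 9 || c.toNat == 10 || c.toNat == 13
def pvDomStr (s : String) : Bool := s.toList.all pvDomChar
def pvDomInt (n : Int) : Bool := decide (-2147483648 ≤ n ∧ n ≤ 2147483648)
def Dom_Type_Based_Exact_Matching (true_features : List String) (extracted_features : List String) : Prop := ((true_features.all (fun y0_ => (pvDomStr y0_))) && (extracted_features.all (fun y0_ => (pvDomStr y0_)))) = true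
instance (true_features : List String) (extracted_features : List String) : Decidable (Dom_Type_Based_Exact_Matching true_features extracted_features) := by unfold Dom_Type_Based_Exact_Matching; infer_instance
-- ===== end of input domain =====

-- B replaces A's full rescan of remaining true features (lower/split redone per pair) by a
-- precomputed word-count-indexed dict of ordered buckets of word-sets; return values are equal.

-- ===== PORT A =====

-- pred_feature.lower().split() / true_feature.lower().split()
def pvWords (s : String) : List String := PySem.Str.split₀ (PySem.Str.lower s)

-- the inner-loop match test: len equality, then every true word in the pred words
def pvMatchA (pw : List String) (t : String) : Bool :=
  let tw := pvWords t
  if pw.length == tw.length then tw.all (fun w => pw.contains w) else false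

-- A's inner loop: first index of a remaining true feature matching pred's word list (break = some).
def pvFindA (pw : List String) : List String → Option Nat
  | [] => none
  | t :: rest =>
    if pvMatchA pw t then some 0 else (pvFindA pw rest).map (· + 1)

def Type_Based_Exact_Matching (true_features : List String) (extracted_features : List String) : Int × Int × Int :=
  -- state: (app_true_features, tps, fps); found/true_index encoded by pvFindA's Option
  let st := extracted_features.foldl (fun (st : List String × Int × Int) pred_feature =>
    let pw := pvWords pred_feature
    match pvFindA pw st.1 with
    | some i => (st.1.eraseIdx i, st.2.1 + 1, st.2.2)   -- del app_true_features[true_index]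
    | none   => (st.1, st.2.1, st.2.2 + 1)) (true_features, 0, 0)
  (st.2.1, st.2.2, (true_features.length : Int) - st.2.1)

-- ===== PORT B =====

-- buckets.setdefault(len(tw), []).append(frozenset(tw))
def pvBuckets (true_features : List String) : PySem.Dict Int (List (PySem.Set String)) :=
  true_features.foldl (fun d t =>
    let tw := pvWords t
    d.modify (tw.length : Int) [] (fun b => b ++ [PySem.Set.ofList tw])) PySem.Dict.empty

-- 'for i, ts in enumerate(bucket): if ts <= ps: del bucket[i]; break'
def pvRemoveFirst {α : Type} (q : α → Bool) : List α → Option (List α)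
  | [] => none
  | a :: l => if q a then some l else (pvRemoveFirst q l).map (a :: ·)

def Type_Based_Exact_Matching_alt (true_features : List String) (extracted_features : List String) : Int × Int × Int :=
  let st := extracted_features.foldl (fun (st : PySem.Dict Int (List (PySem.Set String)) × Int) p =>
    let pw := pvWords p
    let ps := PySem.Set.ofList pw
    match pvRemoveFirst (fun ts => PySem.Set.issubset ts ps) (st.1.getD (pw.length : Int) []) with
    | some b' => (st.1.insert (pw.length : Int) b', st.2 + 1)   -- bucket with ts removed, in place
    | none    => st) (pvBuckets true_features, 0)
  (st.2, (extracted_features.length : Int) - st.2, (true_features.length : Int) - st.2)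

-- ===== PRECONDITION & SPEC =====
def Spec_Type_Based_Exact_Matching (true_features : List String) (extracted_features : List String) (out : Int × Int × Int) : Prop := out = Type_Based_Exact_Matching_alt true_features extracted_features
instance (true_features : List String) (extracted_features : List String) (out : Int × Int × Int) : Decidable (Spec_Type_Based_Exact_Matching true_features extracted_features out) := by unfold Spec_Type_Based_Exact_Matching; infer_instance

-- ===== CLAIM (what is proved, stated in full; the proofs are below) =====
def Claim_equal_Type_Based_Exact_Matching : Prop := ∀ (true_features : List String) (extracted_features : List String), Dom_Type_Based_Exact_Matching true_features extracted_features → Spec_Type_Based_Exact_Matching true_features extracted_features (Type_Based_Exact_Matching true_features extracted_features)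

-- ===== LEMMAS AND PROOFS =====

-- the word-set stored in a bucket
def pvKey (s : String) : PySem.Set String := PySem.Set.ofList (pvWords s)

-- invariant: bucket n of d is exactly the word-sets of the remaining true features with n words
def pvInv (r : List String) (d : PySem.Dict Int (List (PySem.Set String))) : Prop :=
  ∀ n : Int, d.getD n [] = ((r.filter (fun s => ((pvWords s).length : Int) == n)).map pvKey)

lemma pvFindA_eq_removeFirst (pw : List String) (r : List String) :
    (pvFindA pw r).map (r.eraseIdx ·) = pvRemoveFirst (pvMatchA pw) r := by
  induction r with
  | nil => simp [pvFindA, pvRemoveFirst]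
  | cons t rest ih =>
    cases h : pvMatchA pw t with
    | true => simp [pvFindA, pvRemoveFirst, h]
    | false =>
      simp only [pvFindA, pvRemoveFirst, h, Bool.false_eq_true, if_false, ← ih,
        Option.map_map]
      cases pvFindA pw rest <;> simp [List.eraseIdx]

lemma pvRemoveFirst_map {α β : Type} (q : β → Bool) (f : α → β) (l : List α) :
    pvRemoveFirst q (l.map f) = (pvRemoveFirst (fun a => q (f a)) l).map (List.map f) := by
  induction l with
  | nil => simp [pvRemoveFirst]
  | cons a l ih =>
    simp only [List.map_cons, pvRemoveFirst]
    by_cases h : q (f a) = true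
    · simp [h]
    · simp only [Bool.not_eq_true] at h
      simp [h, ih, Option.map_map, Function.comp_def]

lemma pvRemoveFirst_congr {α : Type} {q q' : α → Bool} (l : List α)
    (h : ∀ a ∈ l, q a = q' a) :
    pvRemoveFirst q l = pvRemoveFirst q' l := by
  induction l with
  | nil => rfl
  | cons a l ih =>
    simp only [pvRemoveFirst, h a (by simp)]
    rw [ih (fun a ha => h a (by simp [ha]))]

lemma pvRemoveFirst_filter {α : Type} (q p : α → Bool) (l : List α)
    (h : ∀ a, q a = true → p a = true) :
    pvRemoveFirst q (l.filter p) = (pvRemoveFirst q l).map (List.filter p) := by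
  induction l with
  | nil => simp [pvRemoveFirst]
  | cons a l ih =>
    by_cases hq : q a = true
    · have hp := h a hq
      simp [hp, pvRemoveFirst, hq]
    · simp only [Bool.not_eq_true] at hq
      by_cases hp : p a = true
      · simp [hp, pvRemoveFirst, hq, ih, Option.map_map, Function.comp_def]
      · simp only [Bool.not_eq_true] at hp
        have hfa : List.filter p (a :: l) = List.filter p l := by
          simp [hp]
        rw [hfa, ih]
        simp only [pvRemoveFirst, hq, Bool.false_eq_true, if_false]
        cases pvRemoveFirst q l <;> simp [hp]

lemma pvRemoveFirst_filter_invar {α : Type} (q p : α → Bool) (l l' : List α)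
    (h : ∀ a, q a = true → p a = false)
    (hr : pvRemoveFirst q l = some l') :
    l'.filter p = l.filter p := by
  induction l generalizing l' with
  | nil => simp [pvRemoveFirst] at hr
  | cons a l ih =>
    simp only [pvRemoveFirst] at hr
    by_cases hq : q a = true
    · rw [if_pos hq, Option.some.injEq] at hr
      subst hr
      simp [h a hq]
    · simp only [Bool.not_eq_true] at hq
      simp only [hq, Bool.false_eq_true, if_false, Option.map_eq_some_iff] at hr
      obtain ⟨l'', hl'', rfl⟩ := hr
      rw [List.filter_cons, List.filter_cons, ih _ hl'']

-- trivial direction of pvMatchA: a match has exactly pw.length words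
lemma pvMatchA_length {pw : List String} {t : String} (h : pvMatchA pw t = true) :
    (pvWords t).length = pw.length := by
  unfold pvMatchA at h
  by_cases hl : pw.length = (pvWords t).length
  · exact hl.symm
  · simp [hl] at h

-- the bucket membership test equals A's match test on same-length features
lemma pvSubset_eq_match (pw : List String) (t : String)
    (hl : (pvWords t).length = pw.length) :
    PySem.Set.issubset (pvKey t) (PySem.Set.ofList pw) = pvMatchA pw t := by
  have hm : pvMatchA pw t = (pvWords t).all (fun w => pw.contains w) := by
    unfold pvMatchA
    simp [hl]
  rw [hm]
  by_cases hsub : PySem.Set.issubset (pvKey t) (PySem.Set.ofList pw) = true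
  · rw [hsub]
    symm
    rw [List.all_eq_true]
    intro x hx
    have hx' : x ∈ pvKey t := (PySem.Set.mem_ofList _ _).mpr hx
    have h2 := (PySem.Set.issubset_iff _ _).mp hsub x hx'
    have h3 := (PySem.Set.mem_ofList _ _).mp h2
    simpa using h3
  · have hsub' := hsub
    rw [Bool.not_eq_true] at hsub'
    rw [hsub']
    symm
    rw [← Bool.not_eq_true]
    intro hall
    apply hsub
    rw [PySem.Set.issubset_iff]
    intro x hx
    have hx' := (PySem.Set.mem_ofList (pvWords t) x).mp hx
    have h2 := List.all_eq_true.mp hall x hx'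
    rw [PySem.Set.mem_ofList]
    simpa using h2

-- one predicted feature: the bucket removal seen through the invariant
lemma pvBucket_step (pw : List String) (r : List String)
    (d : PySem.Dict Int (List (PySem.Set String))) (hinv : pvInv r d) :
    pvRemoveFirst (fun ts => PySem.Set.issubset ts (PySem.Set.ofList pw)) (d.getD (pw.length : Int) []) =
      (pvRemoveFirst (pvMatchA pw) r).map
        (fun r' => (r'.filter (fun s => ((pvWords s).length : Int) == (pw.length : Int))).map pvKey) := by
  rw [hinv (pw.length : Int)]
  rw [pvRemoveFirst_map]
  rw [pvRemoveFirst_congr (q' := pvMatchA pw)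
      (h := by
        intro a ha
        rw [List.mem_filter] at ha
        have hlen : (pvWords a).length = pw.length := by
          have := ha.2
          simpa using this
        exact pvSubset_eq_match pw a hlen)]
  rw [pvRemoveFirst_filter (pvMatchA pw) _ r
      (by intro a ha; simp [pvMatchA_length ha])]
  cases pvRemoveFirst (pvMatchA pw) r <;> simp

-- invariant is preserved by one matched removal
lemma pvInv_step {pw : List String} {r r' : List String}
    {d : PySem.Dict Int (List (PySem.Set String))} (hinv : pvInv r d)
    (hr : pvRemoveFirst (pvMatchA pw) r = some r') :
    pvInv r' (d.insert (pw.length : Int)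
      ((r'.filter (fun s => ((pvWords s).length : Int) == (pw.length : Int))).map pvKey)) := by
  intro n
  rw [PySem.Dict.getD_insert]
  by_cases hn : n = (pw.length : Int)
  · simp [hn]
  · rw [if_neg hn, hinv n]
    congr 1
    exact (pvRemoveFirst_filter_invar (pvMatchA pw) _ r r'
      (by
        intro a ha
        have := pvMatchA_length ha
        simp only [this, beq_eq_false_iff_ne, ne_eq]
        exact fun h => hn h.symm) hr).symm

-- the initial buckets satisfy the invariant
lemma pvInv_buckets_aux (tf : List String) :
    ∀ (r : List String) (d : PySem.Dict Int (List (PySem.Set String))), pvInv r d →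
      pvInv (r ++ tf) (tf.foldl (fun d t =>
        d.modify ((pvWords t).length : Int) [] (fun b => b ++ [PySem.Set.ofList (pvWords t)])) d) := by
  induction tf with
  | nil => intro r d h; simpa using h
  | cons t tf ih =>
    intro r d h
    have h' : pvInv (r ++ [t])
        (d.modify ((pvWords t).length : Int) [] (fun b => b ++ [PySem.Set.ofList (pvWords t)])) := by
      intro n
      rw [PySem.Dict.getD_modify]
      by_cases hn : n = ((pvWords t).length : Int)
      · subst hn
        rw [if_pos rfl, h]
        rw [List.filter_append]
        simp [pvKey]
      · rw [if_neg hn, h n, List.filter_append]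
        have hfalse : (((pvWords t).length : Int) == n) = false := by
          simp only [beq_eq_false_iff_ne, ne_eq]
          exact fun he => hn he.symm
        simp [hfalse]
    rw [show r ++ t :: tf = (r ++ [t]) ++ tf from by simp, List.foldl_cons]
    exact ih (r ++ [t]) _ h' 

lemma pvInv_buckets (tf : List String) : pvInv tf (pvBuckets tf) := by
  have := pvInv_buckets_aux tf [] PySem.Dict.empty (by intro n; simp [PySem.Dict.getD_empty])
  simpa [pvBuckets] using this

-- the two loop bodies, named (definitionally equal to the lambdas in the ports)
def pvStepA (st : List String × Int × Int) (pred_feature : String) : List String × Int × Int :=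
  match pvFindA (pvWords pred_feature) st.1 with
  | some i => (st.1.eraseIdx i, st.2.1 + 1, st.2.2)
  | none   => (st.1, st.2.1, st.2.2 + 1)

def pvStepB (st : PySem.Dict Int (List (PySem.Set String)) × Int) (p : String) :
    PySem.Dict Int (List (PySem.Set String)) × Int :=
  match pvRemoveFirst (fun ts => PySem.Set.issubset ts (PySem.Set.ofList (pvWords p)))
      (st.1.getD ((pvWords p).length : Int) []) with
  | some b' => (st.1.insert ((pvWords p).length : Int) b', st.2 + 1)
  | none    => st

-- the two folds agree: equal tps, A's fps is the complement
lemma pvLoop_eq (ef : List String) :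
    ∀ (r : List String) (d : PySem.Dict Int (List (PySem.Set String))) (tps fps : Int),
      pvInv r d →
      (ef.foldl pvStepB (d, tps)).2 = (ef.foldl pvStepA (r, tps, fps)).2.1 ∧
      (ef.foldl pvStepA (r, tps, fps)).2.2 =
        fps + (ef.length : Int) - ((ef.foldl pvStepA (r, tps, fps)).2.1 - tps) := by
  induction ef with
  | nil => intro r d tps fps _; constructor <;> simp
  | cons p ef ih =>
    intro r d tps fps hinv
    have hb := pvBucket_step (pvWords p) r d hinv
    have hfind := pvFindA_eq_removeFirst (pvWords p) r
    cases hrm : pvRemoveFirst (pvMatchA (pvWords p)) r with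
    | none =>
      rw [hrm] at hb hfind
      have hfa : pvFindA (pvWords p) r = none := by
        cases h : pvFindA (pvWords p) r
        · rfl
        · rw [h] at hfind; simp at hfind
      have hA : pvStepA (r, tps, fps) p = (r, tps, fps + 1) := by
        simp [pvStepA, hfa]
      have hB : pvStepB (d, tps) p = (d, tps) := by
        simp only [Option.map_none] at hb
        simp [pvStepB, hb]
      rw [List.foldl_cons, List.foldl_cons, hA, hB]
      obtain ⟨h1, h2⟩ := ih r d tps (fps + 1) hinv
      refine ⟨h1, ?_⟩
      rw [h2, List.length_cons]
      push_cast
      ring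
    | some r' =>
      rw [hrm] at hb hfind
      obtain ⟨i, hfa, herase⟩ : ∃ i, pvFindA (pvWords p) r = some i ∧ r.eraseIdx i = r' := by
        cases h : pvFindA (pvWords p) r with
        | none => rw [h] at hfind; simp at hfind
        | some i =>
          rw [h] at hfind
          simp only [Option.map_some, Option.some.injEq] at hfind
          exact ⟨i, rfl, hfind⟩
      have hA : pvStepA (r, tps, fps) p = (r', tps + 1, fps) := by
        simp [pvStepA, hfa, herase]
      have hB : pvStepB (d, tps) p =
          (d.insert ((pvWords p).length : Int)
            ((r'.filter (fun s => ((pvWords s).length : Int) == ((pvWords p).length : Int))).map pvKey),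
           tps + 1) := by
        simp only [Option.map_some] at hb
        simp [pvStepB, hb]
      rw [List.foldl_cons, List.foldl_cons, hA, hB]
      obtain ⟨h1, h2⟩ := ih r' _ (tps + 1) fps (pvInv_step hinv hrm)
      refine ⟨h1, ?_⟩
      rw [h2, List.length_cons]
      push_cast
      ring

-- ===== VERDICT (by name: the statement is the Claim_ definition above) =====
theorem Type_Based_Exact_Matching_spec : Claim_equal_Type_Based_Exact_Matching := by
  intro tf ef _
  unfold Spec_Type_Based_Exact_Matching
  have hA : Type_Based_Exact_Matching tf ef =
      ((ef.foldl pvStepA (tf, 0, 0)).2.1, (ef.foldl pvStepA (tf, 0, 0)).2.2,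
        (tf.length : Int) - (ef.foldl pvStepA (tf, 0, 0)).2.1) := rfl
  have hB : Type_Based_Exact_Matching_alt tf ef =
      ((ef.foldl pvStepB (pvBuckets tf, 0)).2,
        (ef.length : Int) - (ef.foldl pvStepB (pvBuckets tf, 0)).2,
        (tf.length : Int) - (ef.foldl pvStepB (pvBuckets tf, 0)).2) := rfl
  rw [hA, hB]
  obtain ⟨h1, h2⟩ := pvLoop_eq ef tf (pvBuckets tf) 0 0 (pvInv_buckets tf)
  rw [h1, h2]
  norm_num
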